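-- pv_equiv track=rewrite | github.com/KenziVisor/AmosOz2Vec | AmosOz2Function.py | rank_dictionary
-- ===== SOURCE A (Python) =====
-- def rank_dictionary(counter_dict):
--     '''
--     :param counter_dict: Sorted dictionary to rank
--     :return: A dictionary with same keys as input, but the value is the relative rank of the key
--     '''
--     keys = list(counter_dict.keys())
--     ranked_dict = dict.fromkeys(keys, 0)
--     curr_rank = 0
--     how_many_in_rank = 0
--     curr_value = -1
--     for key in keys:
--         value = counter_dict[key]
--         if curr_value != value:
--             rank = curr_rank + 1 + how_many_in_rank
--             how_many_in_rank = 0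
--             curr_value = value
--             curr_rank = rank
--         else:
--             rank = curr_rank
--             how_many_in_rank += 1
--         ranked_dict[key] = rank
--     return ranked_dict
-- ===== SOURCE B (Python) =====
-- def rank_dictionary(counter_dict):
--     '''
--     :param counter_dict: Sorted dictionary to rank
--     :return: A dictionary with same keys as input, but the value is the relative rank of the key
--     '''
--     items = list(counter_dict.items())
--     pairs = []
--     i, n = 0, len(items)
--     while i < n:
--         # find the end of the run of equal values starting at i
--         j = i + 1
--         while j < n and items[j][1] == items[i][1]:
--             j += 1
--         rank = i + 1
--         pairs.extend((key, rank) for key, _ in items[i:j])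
--         i = j
--     return dict(pairs)
-- ===== Notes on version B (the rewrite author's own statement) =====
-- stated objective: alternative
-- what changed: B segments the items into runs of equal values with an index-scanning inner loop and assigns each whole run the rank start_index+1 read from the run's position, building a pair list that becomes the dict at the end; A instead walks item by item maintaining curr_rank/how_many_in_rank/curr_value accumulators.
-- intended difference: On dicts whose first value is -1, A's -1 sentinel makes the leading run of -1 values get rank 0 while B gives it rank 1; ranks should start at 1, so A's 0 is an artefact of the sentinel. — e.g. on rank_dictionary([("a", -1)]): A returns [("a", 0)], B returns [("a", 1)]
import Mathlib
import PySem

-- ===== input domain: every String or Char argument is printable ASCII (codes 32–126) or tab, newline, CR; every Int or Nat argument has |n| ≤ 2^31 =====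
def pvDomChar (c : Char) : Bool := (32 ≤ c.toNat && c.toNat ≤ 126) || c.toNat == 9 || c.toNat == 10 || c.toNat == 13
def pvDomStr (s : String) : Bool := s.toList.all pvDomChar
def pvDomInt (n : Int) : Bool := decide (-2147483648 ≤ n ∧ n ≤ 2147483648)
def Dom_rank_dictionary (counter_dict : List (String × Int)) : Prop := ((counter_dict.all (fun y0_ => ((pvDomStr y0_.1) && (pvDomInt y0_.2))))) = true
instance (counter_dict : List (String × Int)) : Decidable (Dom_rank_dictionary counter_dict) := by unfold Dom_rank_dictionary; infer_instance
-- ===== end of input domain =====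

-- B segments the items into runs of equal values and ranks each whole run by its start position,
-- replacing A's per-item curr_rank/how_many_in_rank/curr_value accumulators; B intentionally gives
-- rank 1 (not A's 0) to a leading run of -1 values (see D_ below).
-- The input dict is its association list (insertion order, first-match lookup).

-- ===== PORT A =====
-- counter_dict[key]: first-match lookup (exact here: every key looked up is a key of the dict)
def pvLookupA (counter_dict : List (String × Int)) (k : String) : Int :=
  ((counter_dict.find? (fun p => p.1 == k)).map Prod.snd).getD 0

-- loop body; state = (ranked_dict as its item list, curr_rank, how_many_in_rank, curr_value).
-- ranked_dict = dict.fromkeys(keys, 0) then exactly one assignment per key, in the fromkeys key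
-- order and keys distinct: the dict's item list is the (key, rank) pairs appended in loop order.
def pvStepA (counter_dict : List (String × Int))
    (st : List (String × Int) × Int × Int × Int) (key : String) :
    List (String × Int) × Int × Int × Int :=
  let value := pvLookupA counter_dict key
  if st.2.2.2 ≠ value then
    (st.1 ++ [(key, st.2.1 + 1 + st.2.2.1)], st.2.1 + 1 + st.2.2.1, 0, value)
  else
    (st.1 ++ [(key, st.2.1)], st.2.1, st.2.2.1 + 1, st.2.2.2)

-- keys = list(counter_dict.keys()) = first occurrences of the keys, in order
def rank_dictionary (counter_dict : List (String × Int)) : List (String × Int) :=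
  ((PySem.List.dedup (counter_dict.map Prod.fst)).foldl (pvStepA counter_dict) ([], 0, 0, -1)).1

-- ===== PORT B =====
-- counter_dict.items(): the distinct keys in insertion order, each with its value
def pvDictItems (counter_dict : List (String × Int)) : List (String × Int) :=
  (PySem.List.dedup (counter_dict.map Prod.fst)).map (fun k => (k, pvLookupA counter_dict k))

-- B's outer while loop over run starts, as recursion on the item-list suffix; the inner
-- 'while j < n and items[j][1] == items[i][1]' scan is the takeWhile, items[i:j] is
-- head :: run, and rank = i + 1 is offset + 1 (offset = number of items before the run).
def pvRuns (offset : Int) : List (String × Int) → List (String × Int)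
  | [] => []
  | (k, v) :: rest =>
    let run := rest.takeWhile (fun p => p.2 == v)
    ((k, offset + 1) :: run.map (fun p => (p.1, offset + 1)))
      ++ pvRuns (offset + 1 + run.length) (rest.dropWhile (fun p => p.2 == v))
termination_by l => l.length
decreasing_by
  simp only [List.length_cons]
  exact Nat.lt_succ_of_le (List.length_dropWhile_le _ _)

-- dict(pairs): the keys are distinct (one pair per distinct key of the input), so the dict's
-- item list is the pair list itself, in order.
def rank_dictionary_alt (counter_dict : List (String × Int)) : List (String × Int) :=
  pvRuns 0 (pvDictItems counter_dict)

-- ===== PRECONDITION & SPEC =====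
-- On dicts whose first value is -1, A's -1 sentinel gives the leading run of -1 values rank 0
-- while B gives it the intended rank 1; ranks should start at 1, so A's 0 is a sentinel artefact.
def D_rank_dictionary (counter_dict : List (String × Int)) : Prop :=
  (counter_dict.head?.map Prod.snd) = some (-1)
instance (counter_dict : List (String × Int)) : Decidable (D_rank_dictionary counter_dict) := by
  unfold D_rank_dictionary; infer_instance

def Spec_rank_dictionary (counter_dict : List (String × Int)) (out : List (String × Int)) : Prop :=
  ¬ D_rank_dictionary counter_dict → out = rank_dictionary_alt counter_dict
instance (counter_dict : List (String × Int)) (out : List (String × Int)) : Decidable (Spec_rank_dictionary counter_dict out) := by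
  unfold Spec_rank_dictionary; infer_instance

def pvDiffWitness_rank_dictionary : (List (String × Int)) := [("a", -1)]
def pvDiffWitnessOut_rank_dictionary : (List (String × Int)) × (List (String × Int)) :=
  ([("a", 0)], [("a", 1)])

-- ===== CLAIM (what is proved, stated in full; the proofs are below) =====
def Claim_unchanged_rank_dictionary : Prop := ∀ (counter_dict : List (String × Int)), Dom_rank_dictionary counter_dict → Spec_rank_dictionary counter_dict (rank_dictionary counter_dict)
def Claim_changed_rank_dictionary : Prop := Dom_rank_dictionary (pvDiffWitness_rank_dictionary) ∧ D_rank_dictionary (pvDiffWitness_rank_dictionary) ∧ rank_dictionary (pvDiffWitness_rank_dictionary) = pvDiffWitnessOut_rank_dictionary.1 ∧ rank_dictionary_alt (pvDiffWitness_rank_dictionary) = pvDiffWitnessOut_rank_dictionary.2 ∧ pvDiffWitnessOut_rank_dictionary.1 ≠ pvDiffWitnessOut_rank_dictionary.2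
def Claim_exact_rank_dictionary : Prop := ∀ (counter_dict : List (String × Int)), Dom_rank_dictionary counter_dict → D_rank_dictionary counter_dict → rank_dictionary counter_dict ≠ rank_dictionary_alt counter_dict

-- ===== LEMMAS AND PROOFS =====

-- A's loop body seen on a (key, value) pair instead of a key (proof-only reformulation)
def pvStepA2 (st : List (String × Int) × Int × Int × Int) (p : String × Int) :
    List (String × Int) × Int × Int × Int :=
  if st.2.2.2 ≠ p.2 then
    (st.1 ++ [(p.1, st.2.1 + 1 + st.2.2.1)], st.2.1 + 1 + st.2.2.1, 0, p.2)
  else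
    (st.1 ++ [(p.1, st.2.1)], st.2.1, st.2.2.1 + 1, st.2.2.2)

theorem foldA_eq_foldA2 (d : List (String × Int)) (init : List (String × Int) × Int × Int × Int) :
    (PySem.List.dedup (d.map Prod.fst)).foldl (pvStepA d) init
      = (pvDictItems d).foldl pvStepA2 init := by
  unfold pvDictItems
  rw [List.foldl_map]
  rfl

theorem dedup_cons {α : Type} [BEq α] (x : α) (xs : List α) :
    ∃ t, PySem.List.dedup (x :: xs) = x :: t := by
  suffices h : ∀ (l : List α) (acc : List α), ∃ t, l.foldl PySem.Set.add acc = acc ++ t by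
    obtain ⟨t, ht⟩ := h xs [x]
    exact ⟨t, by simpa [PySem.List.dedup, PySem.Set.ofList, PySem.Set.add, PySem.Set.empty,
      PySem.Set.contains] using ht⟩
  intro l
  induction l with
  | nil => exact fun acc => ⟨[], by simp⟩
  | cons y l ih =>
    intro acc
    simp only [List.foldl_cons, PySem.Set.add]
    split
    · exact ih acc
    · obtain ⟨t, ht⟩ := ih (acc ++ [y])
      exact ⟨y :: t, by simp [ht]⟩

theorem lookup_head (p : String × Int) (rest : List (String × Int)) :
    pvLookupA (p :: rest) p.1 = p.2 := by
  simp [pvLookupA, List.find?]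

theorem items_cons (p : String × Int) (rest : List (String × Int)) :
    ∃ t, pvDictItems (p :: rest) = (p.1, p.2) :: t := by
  obtain ⟨t, ht⟩ := dedup_cons p.1 (rest.map Prod.fst)
  refine ⟨t.map (fun k => (k, pvLookupA (p :: rest) k)), ?_⟩
  simp only [pvDictItems, List.map_cons, ht]
  rw [lookup_head]

-- folding A's body over a run of the current value appends rank cr and counts the run in hm
theorem run_fold (run : List (String × Int)) :
    ∀ (acc : List (String × Int)) (cr hm cv : Int), (∀ p ∈ run, p.2 = cv) →
      run.foldl pvStepA2 (acc, cr, hm, cv)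
        = (acc ++ run.map (fun p => (p.1, cr)), cr, hm + run.length, cv) := by
  induction run with
  | nil => intro acc cr hm cv _; simp
  | cons p l ih =>
    intro acc cr hm cv h
    have hp : p.2 = cv := h p (by simp)
    have hstep : pvStepA2 (acc, cr, hm, cv) p = (acc ++ [(p.1, cr)], cr, hm + 1, cv) := by
      simp [pvStepA2, hp]
    rw [List.foldl_cons, hstep, ih _ cr (hm + 1) cv (fun q hq => h q (by simp [hq]))]
    simp [List.append_assoc]
    omega

-- the core invariant: when the current value differs from the next item's value,
-- A's fold from (acc, cr, hm, cv) produces acc ++ B's run ranking at offset cr + hm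
theorem loop_eq (N : ℕ) : ∀ (l : List (String × Int)), l.length ≤ N →
    ∀ (acc : List (String × Int)) (cr hm cv : Int),
      (∀ p, l.head? = some p → p.2 ≠ cv) →
      (l.foldl pvStepA2 (acc, cr, hm, cv)).1 = acc ++ pvRuns (cr + hm) l := by
  induction N with
  | zero =>
    intro l hl acc cr hm cv _
    rw [List.length_eq_zero_iff.mp (Nat.le_zero.mp hl)]
    simp [pvRuns]
  | succ N ih =>
    intro l hl acc cr hm cv h
    match l with
    | [] => simp [pvRuns]
    | (k, v) :: rest =>
      have hv : v ≠ cv := h (k, v) rfl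
      have hv' : ¬ cv = v := fun e => hv e.symm
      have hstep : pvStepA2 (acc, cr, hm, cv) (k, v)
          = (acc ++ [(k, cr + 1 + hm)], cr + 1 + hm, 0, v) := by
        simp [pvStepA2, hv']
      rw [List.foldl_cons, hstep]
      set run := rest.takeWhile (fun p => p.2 == v) with hrun
      set tail := rest.dropWhile (fun p => p.2 == v) with htail
      have hsplit : rest = run ++ tail := (List.takeWhile_append_dropWhile).symm
      have hmem : ∀ p ∈ run, p.2 = v := fun p hp => by
        have := List.mem_takeWhile_imp hp
        simpa using this
      have hhead : ∀ p, tail.head? = some p → p.2 ≠ v := by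
        intro p hp
        have := List.head?_dropWhile_not (fun q => q.2 == v) rest
        rw [← htail, hp] at this
        simpa using this
      have hlen : tail.length ≤ N := by
        have h1 : tail.length ≤ rest.length := htail ▸ List.length_dropWhile_le _ _
        have h2 : rest.length + 1 ≤ N + 1 := by simpa using hl
        omega
      conv_lhs => rw [hsplit]
      rw [List.foldl_append,
        run_fold run _ (cr + 1 + hm) 0 v hmem,
        ih tail hlen _ _ _ _ hhead]
      conv_rhs => rw [pvRuns]
      simp only [← hrun, ← htail]
      have e2 : cr + 1 + hm + (0 + (run.length : Int)) = cr + hm + 1 + run.length := by ring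
      have e1 : cr + hm + 1 = cr + 1 + hm := by ring
      rw [e2]
      simp only [e1, List.append_assoc, List.cons_append, List.nil_append]

-- the accumulator of both folds is a prefix of the result (used for the tight theorem)
theorem prefix_foldA2 (l : List (String × Int)) :
    ∀ (acc : List (String × Int)) (s : Int × Int × Int),
      ∃ t, (l.foldl pvStepA2 (acc, s)).1 = acc ++ t := by
  induction l with
  | nil => exact fun acc s => ⟨[], by simp⟩
  | cons p l ih =>
    intro acc s
    simp only [List.foldl_cons, pvStepA2]
    split
    · obtain ⟨t, ht⟩ := ih (acc ++ [(p.1, s.1 + 1 + s.2.1)]) (s.1 + 1 + s.2.1, 0, p.2)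
      exact ⟨[(p.1, s.1 + 1 + s.2.1)] ++ t, by rw [ht, List.append_assoc]⟩
    · obtain ⟨t, ht⟩ := ih (acc ++ [(p.1, s.1)]) (s.1, s.2.1 + 1, s.2.2)
      exact ⟨[(p.1, s.1)] ++ t, by rw [ht, List.append_assoc]⟩

-- ===== VERDICT (by name: the statement is the Claim_ definition above) =====
theorem rank_dictionary_spec : Claim_unchanged_rank_dictionary := by
  intro d _ hD
  unfold rank_dictionary rank_dictionary_alt
  rw [foldA_eq_foldA2]
  cases d with
  | nil =>
    simp [pvDictItems, PySem.List.dedup, PySem.Set.ofList, PySem.Set.empty, pvRuns]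
  | cons p rest =>
    have hv : p.2 ≠ -1 := fun h => hD (by simp [D_rank_dictionary, h])
    obtain ⟨t, ht⟩ := items_cons p rest
    rw [ht]
    have := loop_eq ((p.1, p.2) :: t).length ((p.1, p.2) :: t) le_rfl [] 0 0 (-1)
      (by intro q hq
          have hq' : q = (p.1, p.2) := by simpa [eq_comm] using hq
          rw [hq']; exact hv)
    simpa using this

theorem rank_dictionary_changed : Claim_changed_rank_dictionary := by
  unfold Claim_changed_rank_dictionary
  refine ⟨by decide, by decide, by decide, ?_, by decide⟩
  show rank_dictionary_alt [("a", -1)] = [("a", 1)]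
  have h : pvDictItems [("a", -1)] = [("a", -1)] := by decide
  rw [rank_dictionary_alt, h]
  simp [pvRuns]

theorem rank_dictionary_tight : Claim_exact_rank_dictionary := by
  intro d _ hD
  cases d with
  | nil => simp [D_rank_dictionary] at hD
  | cons p rest =>
    obtain ⟨k, v⟩ := p
    have hv : v = -1 := by simpa [D_rank_dictionary] using hD
    unfold rank_dictionary rank_dictionary_alt
    rw [foldA_eq_foldA2]
    obtain ⟨t, ht⟩ := items_cons (k, v) rest
    rw [ht, List.foldl_cons]
    have hA : pvStepA2 (([] : List (String × Int)), 0, 0, -1) ((k, v).1, (k, v).2)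
        = ([(k, 0)], 0, 1, -1) := by
      simp [pvStepA2, hv]
    rw [hA]
    obtain ⟨tA, htA⟩ := prefix_foldA2 t [(k, 0)] (0, 1, -1)
    rw [htA]
    simp [pvRuns]
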